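-- pv_equiv track=rewrite | github.com/nahgil2614/cryptopals | set2/ECB_CBCdetection.py | repCount
-- ===== SOURCE A (Python) =====
-- def repCount( string ):
--     rep = 0
--     mes = []
--     for i in range(0, len(string), 16):
--         overlapped = False
--         for sub_strs in mes:
--             if string[i:i+16] == sub_strs:
--                 overlapped = True
--                 rep += 1
--                 break
--         if not overlapped:
--             mes += [string[i:i+16]]
--     return rep
-- ===== SOURCE B (Python) =====
-- def repCount( string ):
--     blocks = [string[i:i+16] for i in range(0, len(string), 16)]
--     blocks.sort()
--     rep = 0
--     for j in range(1, len(blocks)):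
--         if blocks[j] == blocks[j-1]:
--             rep += 1
--     return rep
-- ===== Notes on version B (the rewrite author's own statement) =====
-- stated objective: faster
-- what changed: Replaces A's nested membership scan over the list of already-seen 16-byte blocks by building the block list once, sorting it, and counting adjacent equal neighbours in a single pass (rep = total blocks - distinct blocks).
import Mathlib
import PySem

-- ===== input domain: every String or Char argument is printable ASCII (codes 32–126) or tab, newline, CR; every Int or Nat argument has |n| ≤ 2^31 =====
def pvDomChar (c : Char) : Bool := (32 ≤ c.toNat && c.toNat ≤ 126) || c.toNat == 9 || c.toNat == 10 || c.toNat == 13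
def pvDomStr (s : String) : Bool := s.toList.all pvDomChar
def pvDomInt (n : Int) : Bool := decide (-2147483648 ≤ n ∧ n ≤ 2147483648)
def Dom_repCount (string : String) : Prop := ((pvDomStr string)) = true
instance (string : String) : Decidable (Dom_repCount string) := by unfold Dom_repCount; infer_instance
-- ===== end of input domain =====

-- B replaces A's quadratic scan over already-seen blocks by sorting the 16-byte blocks
-- once and counting adjacent equal neighbours in a single pass.

-- ===== PORT A =====
-- inner 'for sub_strs in mes: if string[i:i+16] == sub_strs: … break' loop
def repCountScan (bl : String) : List String → Bool
  | [] => false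
  | m :: rest => if bl == m then true else repCountScan bl rest

-- one iteration of A's outer loop: state = (rep, mes)
def repCountStep (string : String) (st : Int × List String) (i : Int) : Int × List String :=
  let bl := PySem.Str.slice string (some i) (some (i + 16))
  if repCountScan bl st.2 then (st.1 + 1, st.2) else (st.1, st.2 ++ [bl])

def repCount (string : String) : Int :=
  ((PySem.List.pyRange 0 (PySem.Str.len string) 16).foldl (repCountStep string) (0, [])).1

-- ===== PORT B =====
def repCount_alt (string : String) : Int :=
  let blocks := (PySem.List.pyRange 0 (PySem.Str.len string) 16).map
      (fun i => PySem.Str.slice string (some i) (some (i + 16)))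
  let sblocks := PySem.List.sorted blocks (fun b => b) false
  (PySem.List.pyRange 1 (PySem.List.len sblocks) 1).foldl
    (fun rep j =>
      if PySem.List.pyGetD sblocks j "" == PySem.List.pyGetD sblocks (j - 1) "" then rep + 1
      else rep)
    (0 : Int)

-- ===== PRECONDITION & SPEC =====
def Spec_repCount (string : String) (out : Int) : Prop := out = repCount_alt string
instance (string : String) (out : Int) : Decidable (Spec_repCount string out) := by unfold Spec_repCount; infer_instance

-- ===== CLAIM (what is proved, stated in full; the proofs are below) =====
def Claim_equal_repCount : Prop := ∀ (string : String), Dom_repCount string → Spec_repCount string (repCount string)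

-- ===== LEMMAS AND PROOFS =====

-- A's step, abstracted over the block value (proof helper)
def repStepF (st : Int × List String) (bl : String) : Int × List String :=
  if repCountScan bl st.2 then (st.1 + 1, st.2) else (st.1, st.2 ++ [bl])

theorem repCountScan_eq_mem (bl : String) (l : List String) :
    repCountScan bl l = decide (bl ∈ l) := by
  induction l with
  | nil => simp [repCountScan]
  | cons m rest ih =>
      by_cases h : bl = m <;> simp [repCountScan, h, ih]

theorem repCount_eq_foldl (string : String) :
    repCount string =
      (((PySem.List.pyRange 0 (PySem.Str.len string) 16).map
          (fun i => PySem.Str.slice string (some i) (some (i + 16)))).foldl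
        repStepF (0, [])).1 := by
  rw [List.foldl_map]
  rfl

-- invariant of A's fold: rep + |mes| grows by one per block, mes stays a nodup
-- list whose elements are exactly the blocks seen so far
theorem repFold_invariant (bs : List String) :
    ∀ (r : Int) (mes : List String), mes.Nodup →
      (bs.foldl repStepF (r, mes)).1 =
        r + bs.length + mes.length - (bs.foldl repStepF (r, mes)).2.length ∧
      (bs.foldl repStepF (r, mes)).2.Nodup ∧
      (bs.foldl repStepF (r, mes)).2.toFinset = mes.toFinset ∪ bs.toFinset := by
  induction bs with
  | nil => intro r mes hnd; simp [hnd]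
  | cons b t ih =>
      intro r mes hnd
      rw [List.foldl_cons]
      by_cases hb : b ∈ mes
      · have hstep : repStepF (r, mes) b = (r + 1, mes) := by
          simp [repStepF, repCountScan_eq_mem, hb]
        rw [hstep]
        obtain ⟨h1, h2, h3⟩ := ih (r + 1) mes hnd
        refine ⟨?_, h2, ?_⟩
        · rw [h1]; push_cast [List.length_cons]; ring
        · rw [h3]; ext x
          simp only [Finset.mem_union, List.mem_toFinset, List.mem_cons]
          constructor
          · tauto
          · rintro (h | rfl | h) <;> tauto
      · have hstep : repStepF (r, mes) b = (r, mes ++ [b]) := by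
          simp [repStepF, repCountScan_eq_mem, hb]
        rw [hstep]
        have hnd' : (mes ++ [b]).Nodup :=
          hnd.append (List.nodup_singleton b) (by simpa [List.disjoint_singleton] using hb)
        obtain ⟨h1, h2, h3⟩ := ih r (mes ++ [b]) hnd'
        refine ⟨?_, h2, ?_⟩
        · rw [h1]; push_cast [List.length_append, List.length_cons, List.length_nil]; ring
        · rw [h3]; ext x
          simp only [Finset.mem_union, List.mem_toFinset, List.mem_append,
            List.mem_cons]
          tauto

-- adjacent-equal count of a list (what B's single pass computes)
def adjNat : List String → Nat
  | [] => 0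
  | [_] => 0
  | a :: b :: t => (if b = a then 1 else 0) + adjNat (b :: t)

theorem countRange_adj (l : List String) :
    (List.range (l.length - 1)).countP
        (fun k => l.getD (k + 1) "" == l.getD k "") = adjNat l := by
  induction l with
  | nil => simp [adjNat]
  | cons a t ih =>
      cases t with
      | nil => simp [adjNat]
      | cons b t' =>
          have hlen : (a :: b :: t').length - 1 = t'.length + 1 := by simp
          rw [hlen, List.range_succ_eq_map, List.countP_cons, List.countP_map]
          simp only [adjNat]
          have ht : (b :: t').length - 1 = t'.length := by simp
          rw [← ih, ht]
          have hcongr : ∀ k ∈ List.range t'.length,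
              (((fun k => (a :: b :: t').getD (k + 1) "" == (a :: b :: t').getD k "") ∘
                Nat.succ) k = true)
              ↔ ((fun k => (b :: t').getD (k + 1) "" == (b :: t').getD k "") k = true) := by
            intro k _; simp [Function.comp, Nat.succ_eq_add_one]
          rw [List.countP_congr hcongr]
          have hgd : (a :: b :: t').getD (0 + 1) "" = b := rfl
          have hgd0 : (a :: b :: t').getD 0 "" = a := rfl
          rw [hgd, hgd0]
          by_cases h : b = a <;> simp [h] <;> omega

-- for a ≤-sorted list the adjacent-equal count is length minus number of distinct values
theorem adj_sorted (l : List String) (hs : l.Pairwise (· ≤ ·)) :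
    adjNat l + l.toFinset.card = l.length := by
  induction l with
  | nil => simp [adjNat]
  | cons a t ih =>
      cases t with
      | nil => simp [adjNat]
      | cons b t' =>
          have hs' : (b :: t').Pairwise (· ≤ ·) := hs.of_cons
          have hab : a ≤ b := (List.pairwise_cons.1 hs).1 b (by simp)
          have ih' := ih hs'
          simp only [List.toFinset_cons, List.length_cons] at ih' ⊢
          by_cases h : b = a
          · subst h
            rw [show adjNat (b :: b :: t') = 1 + adjNat (b :: t') from by simp [adjNat],
              Finset.insert_idem]
            omega
          · have hnotmem : a ∉ insert b t'.toFinset := by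
              simp only [Finset.mem_insert, List.mem_toFinset]
              rintro (rfl | hmem)
              · exact h rfl
              · exact h (le_antisymm ((List.pairwise_cons.1 hs').1 a hmem) hab)
            simp only [adjNat, if_neg h]
            rw [Finset.card_insert_of_notMem hnotmem]
            omega

-- B's fold computes adjNat of the sorted block list
theorem repCount_alt_eq_adj (bs : List String) :
    (PySem.List.pyRange 1 (PySem.List.len (PySem.List.sorted bs (fun b => b) false)) 1).foldl
      (fun rep j =>
        if PySem.List.pyGetD (PySem.List.sorted bs (fun b => b) false) j "" ==
            PySem.List.pyGetD (PySem.List.sorted bs (fun b => b) false) (j - 1) "" then rep + 1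
        else rep) (0 : Int)
    = (adjNat (PySem.List.sorted bs (fun b => b) false) : Int) := by
  set ss := PySem.List.sorted bs (fun b => b) false with hss
  rw [PySem.List.foldl_if_add_one
    (fun j => PySem.List.pyGetD ss j "" == PySem.List.pyGetD ss (j - 1) "")]
  rw [PySem.List.pyRange_one, List.countP_map]
  have hlen : PySem.List.len ss = (ss.length : Int) := by simp [PySem.List.len_eq]
  rw [hlen]
  have htn : ((ss.length : Int) - 1).toNat = ss.length - 1 := by omega
  rw [htn]
  have hcongr : ∀ k ∈ List.range (ss.length - 1),
      (((fun j => PySem.List.pyGetD ss j "" == PySem.List.pyGetD ss (j - 1) "") ∘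
        (fun k : Nat => (1 : Int) + k)) k = true)
      ↔ ((fun k => ss.getD (k + 1) "" == ss.getD k "") k = true) := by
    intro k _
    have h2 : (1 : Int) + k - 1 = ((k : Nat) : Int) := by ring
    have h1 : (1 : Int) + k = ((k + 1 : Nat) : Int) := by push_cast; ring
    simp only [Function.comp]
    rw [h2, h1]
    simp only [PySem.List.pyGetD_natCast]
  rw [List.countP_congr hcongr, countRange_adj]
  exact zero_add _

-- ===== VERDICT (by name: the statement is the Claim_ definition above) =====
theorem repCount_spec : Claim_equal_repCount := by
  intro string _
  unfold Spec_repCount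
  set bs := (PySem.List.pyRange 0 (PySem.Str.len string) 16).map
      (fun i => PySem.Str.slice string (some i) (some (i + 16))) with hbs
  -- A's value
  rw [repCount_eq_foldl, ← hbs]
  obtain ⟨h1, h2, h3⟩ := repFold_invariant bs 0 [] List.nodup_nil
  have hA : (bs.foldl repStepF (0, [])).1 = (bs.length : Int) - (bs.toFinset.card : Int) := by
    have hcard : (bs.foldl repStepF (0, [])).2.length = bs.toFinset.card := by
      rw [← List.toFinset_card_of_nodup h2, h3]; simp
    rw [h1, hcard]; push_cast [List.length_nil]; ring
  rw [hA]
  -- B's value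
  show _ = repCount_alt string
  unfold repCount_alt
  rw [← hbs]
  rw [repCount_alt_eq_adj bs]
  set ss := PySem.List.sorted bs (fun b => b) false with hss
  have hperm : ss.Perm bs := PySem.List.sorted_perm bs (fun b => b) false
  have hpw : ss.Pairwise (· ≤ ·) := by
    have := PySem.List.sorted_pairwise bs (fun b => b)
    simpa using this
  have hadj := adj_sorted ss hpw
  have hlen : ss.length = bs.length := hperm.length_eq
  have hfin : ss.toFinset = bs.toFinset := List.toFinset_eq_of_perm _ _ hperm
  rw [hlen, hfin] at hadj
  omega
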